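-- pv_equiv track=rewrite | github.com/shlyapp/ege-informatika | Testers/210913/22.py | F
-- ===== SOURCE A (Python) =====
-- def F(n):
--     x = n
--     a, b = 0, 1
--     while x > 0:
--         a = a + 1
--         b = b * (x % 10)
--         x = x // 10
--     return [a, b]
-- ===== SOURCE B (Python) =====
-- def F(n):
--     if n <= 0:
--         return [0, 1]
--     s = str(n)
--     p = 1
--     for c in s:
--         p *= int(c)
--     return [len(s), p]
-- ===== Notes on version B (the rewrite author's own statement) =====
-- stated objective: idiomatic
-- what changed: B walks the characters of str(n) once, taking the digit count as len(s) and multiplying int(c) for each character, instead of A's arithmetic loop extracting digits by modulus and floor division.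
import Mathlib
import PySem

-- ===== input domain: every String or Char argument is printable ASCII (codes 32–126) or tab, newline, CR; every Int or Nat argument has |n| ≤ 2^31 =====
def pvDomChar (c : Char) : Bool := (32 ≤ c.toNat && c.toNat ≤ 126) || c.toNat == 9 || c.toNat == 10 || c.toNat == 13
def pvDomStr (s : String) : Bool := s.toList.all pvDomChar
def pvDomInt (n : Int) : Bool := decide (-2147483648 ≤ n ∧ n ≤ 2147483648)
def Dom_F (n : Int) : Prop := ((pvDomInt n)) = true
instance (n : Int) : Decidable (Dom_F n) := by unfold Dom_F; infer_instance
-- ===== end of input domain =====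

-- B walks the characters of str(n) once (len and a running product of int(c)) instead of
-- A's arithmetic digit extraction with % 10 / // 10; same result, more idiomatic.

-- ===== PORT A =====
-- the `while x > 0` loop over the state (x, a, b)
def F.loop (x a b : Int) : Int × Int :=
  if 0 < x then
    F.loop (PySem.Int.floordiv x 10) (a + 1) (b * PySem.Int.mod x 10)
  else (a, b)
termination_by x.toNat
decreasing_by
  rw [PySem.Int.floordiv_eq_ediv_of_pos (by omega)]
  omega

def F (n : Int) : List Int :=
  let r := F.loop n 0 1
  [r.1, r.2]

-- ===== PORT B =====
def F_alt (n : Int) : List Int :=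
  if n ≤ 0 then [0, 1]
  else
    let s := PySem.Int.toStr n
    -- `int(c)`: `c` is always a decimal digit of str(n), so ofStr? is always `some`;
    -- `.getD 0` only discharges the Option (Python would raise ValueError, never reached)
    let p := s.toList.foldl (fun p c => p * (PySem.Int.ofStr? (String.ofList [c])).getD 0) 1
    [PySem.Str.len s, p]

-- ===== PRECONDITION & SPEC =====
def Spec_F (n : Int) (out : List Int) : Prop := out = F_alt n
instance (n : Int) (out : List Int) : Decidable (Spec_F n out) := by unfold Spec_F; infer_instance

-- ===== CLAIM (what is proved, stated in full; the proofs are below) =====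
def Claim_equal_F : Prop := ∀ (n : Int), Dom_F n → Spec_F n (F n)

-- ===== LEMMAS AND PROOFS =====

/-- the decimal digit characters of `n`, most significant first (`[]` for 0) -/
def pvChars (n : Nat) : List Char :=
  if n = 0 then [] else pvChars (n / 10) ++ [Nat.digitChar (n % 10)]
decreasing_by exact Nat.div_lt_self (by omega) (by omega)

/-- number of decimal digits (0 for 0) -/
def pvCnt (n : Nat) : Int := if n = 0 then 0 else pvCnt (n / 10) + 1
decreasing_by exact Nat.div_lt_self (by omega) (by omega)

/-- product of the decimal digits (1 for 0) -/
def pvProd (n : Nat) : Int := if n = 0 then 1 else pvProd (n / 10) * ((n % 10 : Nat) : Int)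
decreasing_by exact Nat.div_lt_self (by omega) (by omega)

theorem toDigitsCore_eq_pvChars :
    ∀ (f n : Nat) (acc : List Char), 0 < n → n ≤ f →
      Nat.toDigitsCore 10 f n acc = pvChars n ++ acc := by
  intro f
  induction f with
  | zero => intro n acc h1 h2; omega
  | succ f ih =>
    intro n acc h1 h2
    rw [Nat.toDigitsCore]
    by_cases h : n / 10 = 0
    · simp only [h, if_pos]
      rw [pvChars, if_neg (by omega), pvChars, if_pos h]
      simp
    · simp only [h]
      have hlt : n / 10 < n := Nat.div_lt_self h1 (by omega)
      have hne : ¬ n = 0 := by omega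
      rw [ih (n / 10) ((n % 10).digitChar :: acc) (by omega) (by omega)]
      conv_rhs => rw [pvChars, if_neg hne]
      simp

theorem toStr_toList_eq (n : Int) (hn : 0 < n) :
    (PySem.Int.toStr n).toList = pvChars n.toNat := by
  rw [PySem.Int.toList_toStr]
  unfold PySem.Int.toChars
  rw [if_neg (by omega)]
  unfold Nat.toDigits
  rw [toDigitsCore_eq_pvChars (n.toNat + 1) n.toNat [] (by omega) (by omega)]
  simp

theorem digit_eval (d : Nat) (hd : d < 10) :
    (PySem.Int.ofStr? (String.ofList [Nat.digitChar d])).getD 0 = (d : Int) := by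
  interval_cases d <;> decide

theorem pvChars_foldl (n : Nat) :
    ∀ p : Int,
      (pvChars n).foldl (fun p c => p * (PySem.Int.ofStr? (String.ofList [c])).getD 0) p
        = p * pvProd n := by
  induction n using Nat.strong_induction_on with
  | _ n ih =>
    intro p
    by_cases h : n = 0
    · rw [pvChars, if_pos h, pvProd, if_pos h]; simp
    · rw [pvChars, if_neg h, pvProd, if_neg h]
      rw [List.foldl_append]
      rw [ih (n / 10) (Nat.div_lt_self (by omega) (by omega)) p]
      simp only [List.foldl_cons, List.foldl_nil]
      rw [digit_eval (n % 10) (by omega)]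
      ring

theorem pvChars_length (n : Nat) : ((pvChars n).length : Int) = pvCnt n := by
  induction n using Nat.strong_induction_on with
  | _ n ih =>
    by_cases h : n = 0
    · rw [pvChars, if_pos h, pvCnt, if_pos h]; simp
    · rw [pvChars, if_neg h, pvCnt, if_neg h]
      rw [List.length_append]
      push_cast
      rw [ih (n / 10) (Nat.div_lt_self (by omega) (by omega))]
      simp

theorem loop_spec (x : Int) :
    ∀ a b : Int,
      F.loop x a b = if 0 < x then (a + pvCnt x.toNat, b * pvProd x.toNat) else (a, b) := by
  induction hx : x.toNat using Nat.strong_induction_on generalizing x with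
  | _ m ih =>
    subst hx
    intro a b
    by_cases h : 0 < x
    · rw [F.loop, if_pos h, if_pos h]
      rw [PySem.Int.floordiv_eq_ediv_of_pos (by omega), PySem.Int.mod_eq_emod_of_pos (by omega)]
      rw [ih (x / 10).toNat (by omega) (x / 10) rfl (a + 1) (b * (x % 10))]
      have hN : (x / 10).toNat = x.toNat / 10 := by omega
      have hM : x % 10 = ((x.toNat % 10 : Nat) : Int) := by omega
      have hC : pvCnt x.toNat = pvCnt (x.toNat / 10) + 1 := by
        rw [pvCnt]; rw [if_neg (by omega)]
      have hP : pvProd x.toNat = pvProd (x.toNat / 10) * ((x.toNat % 10 : Nat) : Int) := by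
        rw [pvProd]; rw [if_neg (by omega)]
      rw [hC, hP]
      by_cases h2 : 0 < x / 10
      · rw [if_pos h2, hN, hM]
        simp only [Prod.mk.injEq]
        constructor <;> ring
      · rw [if_neg h2, hM]
        have h0 : x.toNat / 10 = 0 := by omega
        rw [h0, pvCnt, if_pos rfl, pvProd, if_pos rfl]
        simp only [Prod.mk.injEq]
        constructor <;> ring
    · rw [F.loop, if_neg h, if_neg h]

-- ===== VERDICT (by name: the statement is the Claim_ definition above) =====
theorem F_spec : Claim_equal_F := by
  intro n _
  unfold Spec_F F F_alt
  by_cases h : n ≤ 0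
  · rw [if_pos h, loop_spec, if_neg (by omega)]
  · rw [if_neg h]
    simp only
    rw [loop_spec, if_pos (by omega)]
    rw [toStr_toList_eq n (by omega)]
    rw [pvChars_foldl, PySem.Str.len, toStr_toList_eq n (by omega), pvChars_length]
    simp
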